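-- pv_equiv track=rewrite | github.com/KnightDurpy/KnightDurpy | proj08-short/annoying_recursion.py | annoying_climbDownUp
-- ===== SOURCE A (Python) =====
-- def annoying_climbDownUp(n):
--     if n == 0:
--         return []
--     if n == 1:
--         return [1]
--     if n == 2:
--         return [2,1,2]
--     if n == 3:
--         return [3,2,1,2,3]
--     if n == 4:
--         return [4]+annoying_climbDownUp(3)+[n]
--     if n == 5:
--         return [5]+annoying_climbDownUp(4)+[5]
--     if n == 6:
--         return [6]+annoying_climbDownUp(5)+[6]
--     return [n]+annoying_climbDownUp(n-1)+[n]
-- ===== SOURCE B (Python) =====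
-- def annoying_climbDownUp(n):
--     if n == 0:
--         return []
--     res = []
--     i = n
--     while i >= 1:
--         res.append(i)
--         i -= 1
--     i = 2
--     while i <= n:
--         res.append(i)
--         i += 1
--     return res
-- ===== Notes on version B (the rewrite author's own statement) =====
-- stated objective: faster
-- what changed: Replaced A's linear recursion (with its ladder of redundant base cases and per-level list concatenations) by a flat iterative two-phase build: one loop appending n..1, a second appending 2..n into a single accumulator.
import Mathlib
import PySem

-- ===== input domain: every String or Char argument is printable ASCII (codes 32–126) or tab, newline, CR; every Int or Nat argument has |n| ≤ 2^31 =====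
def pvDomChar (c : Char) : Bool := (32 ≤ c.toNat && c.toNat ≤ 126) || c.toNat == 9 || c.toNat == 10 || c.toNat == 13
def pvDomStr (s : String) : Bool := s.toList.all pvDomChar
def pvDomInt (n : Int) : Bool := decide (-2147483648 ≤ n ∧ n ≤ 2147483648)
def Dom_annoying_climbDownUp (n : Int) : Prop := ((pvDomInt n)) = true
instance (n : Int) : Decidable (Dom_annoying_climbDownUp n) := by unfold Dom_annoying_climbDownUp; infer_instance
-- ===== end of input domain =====

-- B replaces A's recursion (quadratic from per-level list concatenations) by an iterative
-- two-loop O(n) build; Pre_ excludes only n < 0, where Python A recurses without a base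
-- case and raises RecursionError.


-- ===== PORT A =====
-- A's unbounded recursion is made total with a fuel parameter; on the admitted inputs
-- (0 ≤ n, fuel = n.toNat) the fuel never runs out, so this is A's computation step for step.
def annoyFuelA : Nat → Int → List Int
  | 0, _ => []
  | f + 1, n =>
    if n = 0 then []
    else if n = 1 then [1]
    else if n = 2 then [2, 1, 2]
    else if n = 3 then [3, 2, 1, 2, 3]
    else if n = 4 then [4] ++ annoyFuelA f 3 ++ [n]
    else if n = 5 then [5] ++ annoyFuelA f 4 ++ [5]
    else if n = 6 then [6] ++ annoyFuelA f 5 ++ [6]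
    else [n] ++ annoyFuelA f (n - 1) ++ [n]

def annoying_climbDownUp (n : Int) : List Int := annoyFuelA n.toNat n

-- ===== PORT B =====
-- first while loop: `while i >= 1: res.append(i); i -= 1` (fuel = enough iterations)
def altDownLoop : Nat → Int → List Int → List Int
  | 0, _, res => res
  | f + 1, i, res => if 1 ≤ i then altDownLoop f (i - 1) (res ++ [i]) else res

-- second while loop: `while i <= n: res.append(i); i += 1`
def altUpLoop : Nat → Int → Int → List Int → List Int
  | 0, _, _, res => res
  | f + 1, i, n, res => if i ≤ n then altUpLoop f (i + 1) n (res ++ [i]) else res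

def annoying_climbDownUp_alt (n : Int) : List Int :=
  if n = 0 then []
  else altUpLoop n.toNat 2 n (altDownLoop n.toNat n [])

-- ===== PRECONDITION & SPEC =====
-- Pre_ excludes exactly the negative n: there Python A's recursion never reaches a base
-- case and raises RecursionError (no value is returned).
def Pre_annoying_climbDownUp (n : Int) : Prop := 0 ≤ n
instance (n : Int) : Decidable (Pre_annoying_climbDownUp n) := by unfold Pre_annoying_climbDownUp; infer_instance
def pvWitness_annoying_climbDownUp : Int := (7)

def Spec_annoying_climbDownUp (n : Int) (out : List Int) : Prop := out = annoying_climbDownUp_alt n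
instance (n : Int) (out : List Int) : Decidable (Spec_annoying_climbDownUp n out) := by unfold Spec_annoying_climbDownUp; infer_instance

-- ===== CLAIM (what is proved, stated in full; the proofs are below) =====
def Claim_equal_annoying_climbDownUp : Prop := ∀ (n : Int), Dom_annoying_climbDownUp n → Pre_annoying_climbDownUp n → Spec_annoying_climbDownUp n (annoying_climbDownUp n)

-- ===== LEMMAS AND PROOFS =====

-- reference closed form S m = [m, m-1, …, 1, 2, …, m]
def refS : Nat → List Int
  | 0 => []
  | 1 => [1]
  | m + 2 => ((m : Int) + 2) :: (refS (m + 1) ++ [(m : Int) + 2])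

-- the descending segment [i, i-1, …, 1]
def downSeg (i : Int) : List Int := (List.range i.toNat).map (fun j : Nat => i - (j : Int))

-- the ascending segment [i, i+1, …, n]
def upSeg (i n : Int) : List Int := (List.range (n + 1 - i).toNat).map (fun j : Nat => i + (j : Int))

lemma downSeg_cons (i : Int) (h : 1 ≤ i) : downSeg i = i :: downSeg (i - 1) := by
  apply List.ext_getElem
  · simp [downSeg]; omega
  · intro k h1 h2
    match k with
    | 0 =>
      simp only [downSeg, List.getElem_map, List.getElem_range, List.getElem_cons_zero]
      simp
    | k + 1 =>
      simp only [downSeg, List.getElem_map, List.getElem_range, List.getElem_cons_succ]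
      push_cast
      ring

lemma downSeg_nil (i : Int) (h : i ≤ 0) : downSeg i = [] := by
  have : i.toNat = 0 := by omega
  simp [downSeg, this]

lemma upSeg_nil (i n : Int) (h : n < i) : upSeg i n = [] := by
  have : (n + 1 - i).toNat = 0 := by omega
  simp [upSeg, this]

lemma upSeg_cons (i n : Int) (h : i ≤ n) : upSeg i n = i :: upSeg (i + 1) n := by
  apply List.ext_getElem
  · simp [upSeg]; omega
  · intro k h1 h2
    match k with
    | 0 =>
      simp only [upSeg, List.getElem_map, List.getElem_range, List.getElem_cons_zero]
      simp
    | k + 1 =>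
      simp only [upSeg, List.getElem_map, List.getElem_range, List.getElem_cons_succ]
      push_cast
      ring

lemma upSeg_snoc (i n : Int) (h : i ≤ n) : upSeg i n = upSeg i (n - 1) ++ [n] := by
  have hm : (n + 1 - i).toNat = (n - 1 + 1 - i).toNat + 1 := by omega
  simp only [upSeg, hm, List.range_succ]
  simp
  omega

lemma altDownLoop_spec : ∀ (f : Nat) (i : Int) (res : List Int), i.toNat ≤ f →
    altDownLoop f i res = res ++ downSeg i := by
  intro f
  induction f with
  | zero => intro i res h; rw [downSeg_nil i (by omega)]; simp [altDownLoop]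
  | succ f ih =>
    intro i res h
    by_cases hi : 1 ≤ i
    · rw [altDownLoop, if_pos hi, ih (i - 1) (res ++ [i]) (by omega),
        downSeg_cons i hi]
      simp
    · rw [altDownLoop, if_neg hi, downSeg_nil i (by omega)]; simp

lemma altUpLoop_spec : ∀ (f : Nat) (i n : Int) (res : List Int), (n + 1 - i).toNat ≤ f →
    altUpLoop f i n res = res ++ upSeg i n := by
  intro f
  induction f with
  | zero => intro i n res h; rw [upSeg_nil i n (by omega)]; simp [altUpLoop]
  | succ f ih =>
    intro i n res h
    by_cases hi : i ≤ n
    · rw [altUpLoop, if_pos hi, ih (i + 1) n (res ++ [i]) (by omega),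
        upSeg_cons i n hi]
      simp
    · rw [altUpLoop, if_neg hi, upSeg_nil i n (by omega)]; simp

lemma refS_closed : ∀ m : Nat, refS m = downSeg (m : Int) ++ upSeg 2 (m : Int) := by
  intro m
  induction m using refS.induct with
  | case1 => decide
  | case2 => decide
  | case3 m ih =>
    have h2 : ((m + 2 : Nat) : Int) = (m : Int) + 2 := by push_cast; ring
    rw [refS, ih, h2, downSeg_cons ((m : Int) + 2) (by omega),
      upSeg_snoc 2 ((m : Int) + 2) (by omega)]
    have h1 : ((m + 1 : Nat) : Int) = (m : Int) + 2 - 1 := by push_cast; ring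
    rw [h1]
    simp

lemma annoyFuelA_spec : ∀ (f m : Nat), m ≤ f → annoyFuelA f (m : Int) = refS m := by
  intro f
  induction f with
  | zero =>
    intro m h
    have : m = 0 := by omega
    subst this; rfl
  | succ f ih =>
    intro m h
    match m with
    | 0 => rfl
    | 1 => rfl
    | 2 => simp [annoyFuelA]; rfl
    | 3 => simp [annoyFuelA]; rfl
    | (m + 4) =>
      have hval : annoyFuelA (f + 1) ((m + 4 : Nat) : Int) =
          [((m + 4 : Nat) : Int)] ++ annoyFuelA f (((m + 4 : Nat) : Int) - 1) ++ [((m + 4 : Nat) : Int)] := by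
        rw [annoyFuelA]
        split_ifs with h0 h1 h2 h3 h4 h5 h6
        · exact absurd h0 (by push_cast; omega)
        · exact absurd h1 (by push_cast; omega)
        · exact absurd h2 (by push_cast; omega)
        · exact absurd h3 (by push_cast; omega)
        · rw [h4]; norm_num
        · rw [h5]; norm_num
        · rw [h6]; norm_num
        · rfl
      rw [hval]
      have hc : (((m + 4 : Nat) : Int) - 1) = ((m + 3 : Nat) : Int) := by push_cast; ring
      rw [hc, ih (m + 3) (by omega)]
      conv_rhs => rw [show m + 4 = (m + 2) + 2 from rfl, refS]
      push_cast
      simp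
      omega

-- ===== VERDICT (by name: the statement is the Claim_ definition above) =====
theorem annoying_climbDownUp_spec : Claim_equal_annoying_climbDownUp := by
  intro n _ hpre
  unfold Pre_annoying_climbDownUp at hpre
  obtain ⟨m, rfl⟩ : ∃ m : Nat, n = (m : Int) := ⟨n.toNat, by omega⟩
  unfold Spec_annoying_climbDownUp annoying_climbDownUp annoying_climbDownUp_alt
  by_cases hz : (m : Int) = 0
  · obtain rfl : m = 0 := by omega
    decide
  · rw [if_neg hz, Int.toNat_natCast,
      altDownLoop_spec m (m : Int) [] (by omega),
      altUpLoop_spec m 2 (m : Int) _ (by omega),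
      annoyFuelA_spec m m (le_refl m), refS_closed m]
    simp
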